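-- pv_equiv track=rewrite | github.com/wangzizhe/GateForge | gateforge/agent_modelica_benchmark_role_registry_v0_27_8.py | _manifest_by_family
-- ===== SOURCE A (Python) =====
-- from collections import Counter, defaultdict
-- from typing import Any
--
-- def _manifest_by_family(rows: list[dict[str, Any]]) -> dict[str, Counter]:
--     counts: dict[str, Counter] = defaultdict(Counter)
--     for row in rows:
--         family = str(row.get("mutation_family") or "")
--         split = str(row.get("split") or "unknown")
--         repeatability = str(row.get("repeatability_class") or "unknown")
--         if not family:
--             continue
--         counts[family][f"split:{split}"] += 1
--         counts[family][f"repeatability:{repeatability}"] += 1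
--         counts[family]["total_manifest_rows"] += 1
--     return dict(counts)
-- ===== SOURCE B (Python) =====
-- from collections import Counter, defaultdict
-- from typing import Any
--
--
-- def _manifest_by_family(rows: list[dict[str, Any]]) -> dict[str, Counter]:
--     # Pass 1: group the rows by their (non-empty) mutation family.
--     groups: dict[str, list] = defaultdict(list)
--     for row in rows:
--         family = str(row.get("mutation_family") or "")
--         if family:
--             groups[family].append(row)
--     # Pass 2: build each family's Counter from its grouped rows.
--     result: dict[str, Counter] = {}
--     for family, grouped in groups.items():
--         c: Counter = Counter()
--         for row in grouped:
--             split = str(row.get("split") or "unknown")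
--             repeatability = str(row.get("repeatability_class") or "unknown")
--             c[f"split:{split}"] += 1
--             c[f"repeatability:{repeatability}"] += 1
--             c["total_manifest_rows"] += 1
--         result[family] = c
--     return result
-- ===== Notes on version B (the rewrite author's own statement) =====
-- stated objective: alternative
-- what changed: A updates a nested dict-of-Counters in a single pass; B first groups the rows into per-family lists (one grouping pass) and then builds each family's Counter in a separate counting pass over its group, preserving first-occurrence family order.
import Mathlib
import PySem

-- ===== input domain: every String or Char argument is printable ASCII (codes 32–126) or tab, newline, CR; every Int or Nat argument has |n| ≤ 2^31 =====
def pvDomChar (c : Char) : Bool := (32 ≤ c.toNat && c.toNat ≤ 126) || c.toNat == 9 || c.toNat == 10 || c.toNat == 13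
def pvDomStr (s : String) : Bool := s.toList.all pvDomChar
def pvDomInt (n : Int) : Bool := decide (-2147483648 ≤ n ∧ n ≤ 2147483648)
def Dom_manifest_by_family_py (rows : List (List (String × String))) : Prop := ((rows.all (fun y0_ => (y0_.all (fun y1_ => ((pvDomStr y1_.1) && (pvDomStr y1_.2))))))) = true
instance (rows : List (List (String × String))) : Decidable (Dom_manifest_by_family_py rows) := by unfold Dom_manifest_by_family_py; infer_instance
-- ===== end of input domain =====

-- B replaces A's single-pass nested dict-of-Counters update by a grouping pass (family → list of rows)
-- followed by a per-family counting pass; same values, alternative decomposition (no speed claim).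


-- shared by both ports: Python's `str(row.get(k) or dflt)` on string values
-- (None → dflt, "" → dflt, otherwise the value itself; str() of a str is the identity)
def pvGetOr (row : List (String × String)) (k dflt : String) : String :=
  match (PySem.Dict.mk row).get? k with
  | some v => if v = "" then dflt else v
  | none => dflt

-- ===== PORT A =====
-- the body of A's `for row in rows:` loop, acting on `counts`
def pvAStep (counts : PySem.Dict String (PySem.Dict String Int))
    (row : List (String × String)) : PySem.Dict String (PySem.Dict String Int) :=
  let family := pvGetOr row "mutation_family" ""
  let split := pvGetOr row "split" "unknown"
  let repeatability := pvGetOr row "repeatability_class" "unknown"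
  if family = "" then counts
  else
    -- counts[family][…] += 1 three times: defaultdict access then Counter increments
    counts.modify family PySem.Dict.empty (fun c =>
      ((c.modify ("split:" ++ split) 0 (· + 1)).modify
          ("repeatability:" ++ repeatability) 0 (· + 1)).modify
        "total_manifest_rows" 0 (· + 1))

def manifest_by_family_py (rows : List (List (String × String))) : List (String × List (String × Int)) :=
  ((rows.foldl pvAStep PySem.Dict.empty).items).map (fun p => (p.1, p.2.items))

-- ===== PORT B =====
-- pass 1 loop body: append the row to its family's group (skip empty family)
def pvGroupStep (groups : PySem.Dict String (List (List (String × String))))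
    (row : List (String × String)) : PySem.Dict String (List (List (String × String))) :=
  let family := pvGetOr row "mutation_family" ""
  if family = "" then groups
  else groups.modify family [] (· ++ [row])

-- pass 2 inner loop body: the three Counter increments for one row
def pvBumpRow (c : PySem.Dict String Int) (row : List (String × String)) : PySem.Dict String Int :=
  let split := pvGetOr row "split" "unknown"
  let repeatability := pvGetOr row "repeatability_class" "unknown"
  ((c.modify ("split:" ++ split) 0 (· + 1)).modify
      ("repeatability:" ++ repeatability) 0 (· + 1)).modify
    "total_manifest_rows" 0 (· + 1)

-- pass 2: build one family's Counter from its grouped rows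
def pvCountGroup (grouped : List (List (String × String))) : PySem.Dict String Int :=
  grouped.foldl pvBumpRow PySem.Dict.empty

def manifest_by_family_py_alt (rows : List (List (String × String))) : List (String × List (String × Int)) :=
  let groups := rows.foldl pvGroupStep PySem.Dict.empty
  groups.items.map (fun p => (p.1, (pvCountGroup p.2).items))

-- ===== PRECONDITION & SPEC =====
def Spec_manifest_by_family_py (rows : List (List (String × String))) (out : List (String × List (String × Int))) : Prop := out = manifest_by_family_py_alt rows
instance (rows : List (List (String × String))) (out : List (String × List (String × Int))) : Decidable (Spec_manifest_by_family_py rows out) := by unfold Spec_manifest_by_family_py; infer_instance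

-- ===== CLAIM (what is proved, stated in full; the proofs are below) =====
def Claim_equal_manifest_by_family_py : Prop := ∀ (rows : List (List (String × String))), Dom_manifest_by_family_py rows → Spec_manifest_by_family_py rows (manifest_by_family_py rows)

-- ===== LEMMAS AND PROOFS =====

-- proof-side view of a grouping dict as A's dict-of-Counters
def pvCountsOf (g : PySem.Dict String (List (List (String × String)))) :
    PySem.Dict String (PySem.Dict String Int) :=
  PySem.Dict.mk (g.items.map (fun p => (p.1, pvCountGroup p.2)))

theorem pvGet?_countsOf (g : PySem.Dict String (List (List (String × String)))) (k : String) :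
    (pvCountsOf g).get? k = (g.get? k).map pvCountGroup := by
  simp [pvCountsOf, PySem.Dict.get?, List.find?_map, Function.comp_def, Option.map_map]

theorem pvContains_countsOf (g : PySem.Dict String (List (List (String × String)))) (k : String) :
    (pvCountsOf g).contains k = g.contains k := by
  simp [pvCountsOf, PySem.Dict.contains, List.any_map, Function.comp_def]

theorem pvCountGroup_append (grouped : List (List (String × String))) (row : List (String × String)) :
    pvCountGroup (grouped ++ [row]) = pvBumpRow (pvCountGroup grouped) row := by
  simp [pvCountGroup, List.foldl_append]

theorem pvStep_comm (g : PySem.Dict String (List (List (String × String)))) (row : List (String × String)) :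
    pvAStep (pvCountsOf g) row = pvCountsOf (pvGroupStep g row) := by
  by_cases hfam : pvGetOr row "mutation_family" "" = ""
  · simp [pvAStep, pvGroupStep, hfam]
  · simp only [pvAStep, pvGroupStep, PySem.Dict.modify, if_neg hfam]
    by_cases hc : g.contains (pvGetOr row "mutation_family" "") = true
    · have hc' := pvContains_countsOf g (pvGetOr row "mutation_family" "")
      rw [hc] at hc'
      have hsome : ∃ rs, g.get? (pvGetOr row "mutation_family" "") = some rs := by
        have := PySem.Dict.contains_eq_isSome_get? g (pvGetOr row "mutation_family" "")
        rw [hc] at this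
        cases h : g.get? (pvGetOr row "mutation_family" "") with
        | none => rw [h] at this; simp at this
        | some rs => exact ⟨rs, rfl⟩
      obtain ⟨rs, hrs⟩ := hsome
      have hg1 : (pvCountsOf g).getD (pvGetOr row "mutation_family" "") PySem.Dict.empty
          = pvCountGroup rs := by
        simp [PySem.Dict.getD, pvGet?_countsOf, hrs]
      have hg2 : g.getD (pvGetOr row "mutation_family" "") [] = rs := by
        simp [PySem.Dict.getD, hrs]
      apply PySem.Dict.ext
      rw [PySem.Dict.items_insert_of_contains _ _ hc']
      simp only [hg1, hg2]
      simp only [pvCountsOf]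
      rw [PySem.Dict.items_insert_of_contains _ _ hc]
      simp only [List.map_map]
      apply List.map_congr_left
      intro p _
      by_cases hp : p.1 = pvGetOr row "mutation_family" ""
      · simp [hp, pvCountGroup_append, pvBumpRow, PySem.Dict.modify]
      · simp [hp]
    · have hc'' : g.contains (pvGetOr row "mutation_family" "") = false := by
        simpa using hc
      have hc' : (pvCountsOf g).contains (pvGetOr row "mutation_family" "") = false := by
        rw [pvContains_countsOf]; exact hc''
      have hg1 : (pvCountsOf g).getD (pvGetOr row "mutation_family" "") PySem.Dict.empty
          = PySem.Dict.empty := PySem.Dict.getD_of_not_contains _ _ hc'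
      have hg2 : g.getD (pvGetOr row "mutation_family" "") [] = [] :=
        PySem.Dict.getD_of_not_contains _ _ hc''
      apply PySem.Dict.ext
      rw [PySem.Dict.items_insert_of_not_contains _ _ hc']
      simp only [hg1, hg2]
      simp only [pvCountsOf]
      rw [PySem.Dict.items_insert_of_not_contains _ _ hc'']
      simp [pvCountGroup, pvBumpRow, PySem.Dict.modify]

theorem pvFold_comm (rows : List (List (String × String)))
    (g : PySem.Dict String (List (List (String × String)))) :
    rows.foldl pvAStep (pvCountsOf g) = pvCountsOf (rows.foldl pvGroupStep g) := by
  induction rows generalizing g with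
  | nil => rfl
  | cons row rest ih => simp only [List.foldl_cons, pvStep_comm, ih]

-- ===== VERDICT (by name: the statement is the Claim_ definition above) =====
theorem manifest_by_family_py_spec : Claim_equal_manifest_by_family_py := by
  intro rows _
  unfold Spec_manifest_by_family_py manifest_by_family_py manifest_by_family_py_alt
  have h0 : (PySem.Dict.empty : PySem.Dict String (PySem.Dict String Int))
      = pvCountsOf PySem.Dict.empty := rfl
  rw [h0, pvFold_comm]
  simp [pvCountsOf, List.map_map, Function.comp_def]
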